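-- pv_equiv track=rewrite | github.com/whp-wessel/ai_scientist | experiment_2a_aella_mimimal/scripts/analyze_h2_religion_strictness_vs_happiness.py | build_tercile_labels
-- ===== SOURCE A (Python) =====
-- from typing import Any, Dict, List, Optional, Sequence, Tuple
--
-- def build_tercile_labels(mapping: Dict[int, int]) -> Dict[int, str]:
--     grouped_values: Dict[int, List[int]] = {0: [], 1: [], 2: []}
--     for value, tercile in mapping.items():
--         grouped_values.setdefault(tercile, []).append(value)
--
--     labels: Dict[int, str] = {}
--     for idx in (0, 1, 2):
--         values = sorted(set(grouped_values.get(idx, [])))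
--         if not values:
--             labels[idx] = f"Tercile {idx + 1} (no assigned levels)"
--         elif values[0] == values[-1]:
--             labels[idx] = f"Tercile {idx + 1} (externalreligion = {values[0]})"
--         else:
--             labels[idx] = (
--                 f"Tercile {idx + 1} (externalreligion in [{values[0]}, {values[-1]}])"
--             )
--     return labels
-- ===== SOURCE B (Python) =====
-- def build_tercile_labels(mapping):
--     bounds = [None, None, None]
--     for value, tercile in mapping.items():
--         if 0 <= tercile <= 2:
--             b = bounds[tercile]
--             if b is None:
--                 bounds[tercile] = (value, value)
--             else:
--                 bounds[tercile] = (min(b[0], value), max(b[1], value))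
--     labels = {}
--     for idx in (0, 1, 2):
--         b = bounds[idx]
--         if b is None:
--             labels[idx] = f"Tercile {idx + 1} (no assigned levels)"
--         elif b[0] == b[1]:
--             labels[idx] = f"Tercile {idx + 1} (externalreligion = {b[0]})"
--         else:
--             labels[idx] = f"Tercile {idx + 1} (externalreligion in [{b[0]}, {b[1]}])"
--     return labels
-- ===== Notes on version B (the rewrite author's own statement) =====
-- stated objective: alternative
-- what changed: Instead of grouping values into per-tercile lists and running sorted(set(...)) on each group to read off the endpoints, B makes a single pass over the mapping keeping only a running (min, max) pair per tercile and formats the labels from those.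
import Mathlib
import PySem

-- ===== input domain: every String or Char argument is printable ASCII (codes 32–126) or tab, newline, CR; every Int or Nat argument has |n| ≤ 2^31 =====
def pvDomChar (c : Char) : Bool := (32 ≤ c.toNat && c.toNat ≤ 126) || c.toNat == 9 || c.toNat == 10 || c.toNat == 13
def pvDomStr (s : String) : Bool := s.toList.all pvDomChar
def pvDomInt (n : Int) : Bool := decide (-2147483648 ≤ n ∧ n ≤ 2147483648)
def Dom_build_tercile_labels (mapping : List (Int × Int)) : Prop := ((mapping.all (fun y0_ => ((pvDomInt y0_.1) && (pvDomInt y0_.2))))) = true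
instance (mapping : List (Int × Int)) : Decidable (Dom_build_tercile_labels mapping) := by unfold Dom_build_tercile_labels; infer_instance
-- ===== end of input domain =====

-- B replaces A's per-tercile sorted(set(...)) passes by a single pass tracking a running (min, max) per tercile (alternative algorithm; same measured cost).

-- ===== PORT A =====
-- grouped_values.setdefault(t, []).append(v) is Dict.modify t [] (· ++ [v]);
-- values[0] / values[-1] are pyGetD (default 0), only evaluated under the non-empty guard, where Python cannot raise.
def build_tercile_labels (mapping : List (Int × Int)) : List (Int × String) :=
  let grouped : PySem.Dict Int (List Int) :=
    mapping.foldl (fun d p => d.modify p.2 [] (· ++ [p.1]))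
      (PySem.Dict.ofList [((0 : Int), ([] : List Int)), (1, []), (2, [])])
  let labels : PySem.Dict Int String :=
    [(0 : Int), 1, 2].foldl (fun lab idx =>
      let values := PySem.List.sorted (PySem.Set.ofList (grouped.getD idx [])) (fun x => x) false
      if values.isEmpty then
        lab.insert idx ("Tercile " ++ PySem.Int.toStr (idx + 1) ++ " (no assigned levels)")
      else if PySem.List.pyGetD values 0 0 = PySem.List.pyGetD values (-1) 0 then
        lab.insert idx ("Tercile " ++ PySem.Int.toStr (idx + 1) ++ " (externalreligion = " ++
          PySem.Int.toStr (PySem.List.pyGetD values 0 0) ++ ")")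
      else
        lab.insert idx ("Tercile " ++ PySem.Int.toStr (idx + 1) ++ " (externalreligion in [" ++
          PySem.Int.toStr (PySem.List.pyGetD values 0 0) ++ ", " ++
          PySem.Int.toStr (PySem.List.pyGetD values (-1) 0) ++ "])")) PySem.Dict.empty
  labels.items

-- ===== PORT B =====
def btlStep (b : Option (Int × Int)) (v : Int) : Option (Int × Int) :=
  match b with
  | none => some (v, v)
  | some (lo, hi) => some (min lo v, max hi v)

def btlLabel (idx : Int) (b : Option (Int × Int)) : String :=
  match b with
  | none => "Tercile " ++ PySem.Int.toStr (idx + 1) ++ " (no assigned levels)"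
  | some (lo, hi) =>
    if lo = hi then
      "Tercile " ++ PySem.Int.toStr (idx + 1) ++ " (externalreligion = " ++ PySem.Int.toStr lo ++ ")"
    else
      "Tercile " ++ PySem.Int.toStr (idx + 1) ++ " (externalreligion in [" ++
        PySem.Int.toStr lo ++ ", " ++ PySem.Int.toStr hi ++ "])"

def build_tercile_labels_alt (mapping : List (Int × Int)) : List (Int × String) :=
  let bs := mapping.foldl
    (fun (bs : Option (Int × Int) × Option (Int × Int) × Option (Int × Int)) p =>
      if p.2 = 0 then (btlStep bs.1 p.1, bs.2.1, bs.2.2)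
      else if p.2 = 1 then (bs.1, btlStep bs.2.1 p.1, bs.2.2)
      else if p.2 = 2 then (bs.1, bs.2.1, btlStep bs.2.2 p.1)
      else bs)
    (none, none, none)
  [(0, btlLabel 0 bs.1), (1, btlLabel 1 bs.2.1), (2, btlLabel 2 bs.2.2)]

-- ===== PRECONDITION & SPEC =====
def Spec_build_tercile_labels (mapping : List (Int × Int)) (out : List (Int × String)) : Prop := out = build_tercile_labels_alt mapping
instance (mapping : List (Int × Int)) (out : List (Int × String)) : Decidable (Spec_build_tercile_labels mapping out) := by unfold Spec_build_tercile_labels; infer_instance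

-- ===== CLAIM (what is proved, stated in full; the proofs are below) =====
def Claim_equal_build_tercile_labels : Prop := ∀ (mapping : List (Int × Int)), Dom_build_tercile_labels mapping → Spec_build_tercile_labels mapping (build_tercile_labels mapping)

-- ===== LEMMAS AND PROOFS =====
-- the values assigned to tercile t, in input order
def btlVals (mapping : List (Int × Int)) (t : Int) : List Int :=
  (mapping.filter (fun p => p.2 == t)).map (·.1)

theorem grouped_getD (mapping : List (Int × Int)) (t : Int)
    (d0 : PySem.Dict Int (List Int)) :
    (mapping.foldl (fun d p => d.modify p.2 [] (· ++ [p.1])) d0).getD t [] =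
      d0.getD t [] ++ btlVals mapping t := by
  have h := PySem.Dict.getD_foldl_modify_append (l := mapping.map (fun p => (p.2, p.1))) (d := d0) (c := t)
  rw [List.foldl_map] at h
  simpa [btlVals, List.filter_map, Function.comp] using h

theorem bounds_foldl (mapping : List (Int × Int))
    (b0 b1 b2 : Option (Int × Int)) :
    mapping.foldl
      (fun (bs : Option (Int × Int) × Option (Int × Int) × Option (Int × Int)) p =>
        if p.2 = 0 then (btlStep bs.1 p.1, bs.2.1, bs.2.2)
        else if p.2 = 1 then (bs.1, btlStep bs.2.1 p.1, bs.2.2)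
        else if p.2 = 2 then (bs.1, bs.2.1, btlStep bs.2.2 p.1)
        else bs) (b0, b1, b2) =
      ((btlVals mapping 0).foldl btlStep b0,
       (btlVals mapping 1).foldl btlStep b1,
       (btlVals mapping 2).foldl btlStep b2) := by
  induction mapping generalizing b0 b1 b2 with
  | nil => simp [btlVals]
  | cons p rest ih =>
    by_cases h0 : p.2 = 0
    · simp [btlVals, List.foldl_cons, h0, ih]
    · by_cases h1 : p.2 = 1
      · simp [btlVals, List.foldl_cons, h1, ih]
      · by_cases h2 : p.2 = 2
        · simp [btlVals, List.foldl_cons, h2, ih]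
        · simp [btlVals, List.foldl_cons, h0, h1, h2, ih]

theorem foldl_btlStep_some (l : List Int) (lo hi : Int) :
    l.foldl btlStep (some (lo, hi)) = some (l.foldl min lo, l.foldl max hi) := by
  induction l generalizing lo hi with
  | nil => rfl
  | cons x xs ih => simp [btlStep, ih]

theorem pairwise_le_getLast (s : List Int) (h : s.Pairwise (fun a b => a ≤ b)) (hne : s ≠ []) :
    ∀ y ∈ s, y ≤ s.getLast hne := by
  induction s with
  | nil => simp
  | cons m t ih =>
    intro y hy
    rcases List.pairwise_cons.mp h with ⟨hm, ht⟩
    cases t with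
    | nil => simp at hy; simp [hy]
    | cons a b =>
      rw [List.getLast_cons (by simp)]
      rcases List.mem_cons.mp hy with rfl | hy
      · exact hm _ (List.getLast_mem _)
      · exact ih ht (by simp) y hy

-- the label A computes from sorted(set(l)) equals the label B computes from the running (min, max)
theorem label_eq (idx : Int) (l : List Int) :
    (if (PySem.List.sorted (PySem.Set.ofList l) (fun x => x) false).isEmpty then
       "Tercile " ++ PySem.Int.toStr (idx + 1) ++ " (no assigned levels)"
     else if PySem.List.pyGetD (PySem.List.sorted (PySem.Set.ofList l) (fun x => x) false) 0 0 =
         PySem.List.pyGetD (PySem.List.sorted (PySem.Set.ofList l) (fun x => x) false) (-1) 0 then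
       "Tercile " ++ PySem.Int.toStr (idx + 1) ++ " (externalreligion = " ++
         PySem.Int.toStr (PySem.List.pyGetD (PySem.List.sorted (PySem.Set.ofList l) (fun x => x) false) 0 0) ++ ")"
     else
       "Tercile " ++ PySem.Int.toStr (idx + 1) ++ " (externalreligion in [" ++
         PySem.Int.toStr (PySem.List.pyGetD (PySem.List.sorted (PySem.Set.ofList l) (fun x => x) false) 0 0) ++ ", " ++
         PySem.Int.toStr (PySem.List.pyGetD (PySem.List.sorted (PySem.Set.ofList l) (fun x => x) false) (-1) 0) ++ "])") =
    btlLabel idx (l.foldl btlStep none) := by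
  cases l with
  | nil => rfl
  | cons x xs =>
    have hstep : (x :: xs).foldl btlStep none = some (xs.foldl min x, xs.foldl max x) := by
      simp [List.foldl_cons, btlStep, foldl_btlStep_some]
    set s := PySem.List.sorted (PySem.Set.ofList (x :: xs)) (fun x => x) false with hsdef
    have hsne : s ≠ [] := by
      rw [hsdef, Ne, PySem.List.sorted_eq_nil_iff]
      intro hemp
      have : x ∈ PySem.Set.ofList (x :: xs) := (PySem.Set.mem_ofList _ _).mpr (by simp)
      simp [hemp] at this
    obtain ⟨m, t, hs⟩ := List.exists_cons_of_ne_nil hsne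
    have hmem : ∀ y, y ∈ s ↔ y ∈ x :: xs := by
      intro y; rw [hsdef, PySem.List.mem_sorted, PySem.Set.mem_ofList]
    have hmin := List.min?_eq_some_iff.mp (rfl : (x :: xs).min? = some (xs.foldl min x))
    have hmax := List.max?_eq_some_iff.mp (rfl : (x :: xs).max? = some (xs.foldl max x))
    have hmlow : ∀ y ∈ x :: xs, m ≤ y := by
      intro y hy
      have h := PySem.List.key_head_sorted_le (PySem.Set.ofList (x :: xs)) (fun x => x) (hsdef ▸ hs)
      exact h y ((PySem.Set.mem_ofList _ _).mpr hy)
    have hmmem : m ∈ x :: xs := (hmem m).mp (hs ▸ List.mem_cons_self)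
    have hmin_eq : m = xs.foldl min x :=
      le_antisymm (hmlow _ hmin.1) (hmin.2 _ hmmem)
    have hpw : List.Pairwise (fun a b => a ≤ b) s := by
      have := PySem.List.sorted_pairwise (xs := PySem.Set.ofList (x :: xs)) (key := fun x => x)
      simpa [hsdef] using this
    have hlast_mem : s.getLast hsne ∈ x :: xs := (hmem _).mp (List.getLast_mem _)
    have hmax_eq : s.getLast hsne = xs.foldl max x :=
      le_antisymm (hmax.2 _ hlast_mem)
        ((pairwise_le_getLast s hpw hsne) _ ((hmem _).mpr hmax.1))
    have hv0 : PySem.List.pyGetD s 0 0 = m := by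
      rw [hs]; simp [PySem.List.pyGetD]
    have hvl : PySem.List.pyGetD s (-1) 0 = s.getLast hsne := by
      simp [PySem.List.pyGetD, PySem.List.pyGet?_neg_one,
        List.getLast?_eq_some_getLast hsne]
    have hempty : s.isEmpty = false := by simp [hsne]
    rw [hstep, btlLabel, hempty]
    simp only [Bool.false_eq_true, if_false, hv0, hvl, hmin_eq, hmax_eq]

theorem insert_ite {κ ν : Type} [BEq κ] (lab : PySem.Dict κ ν) (k : κ)
    (c1 c2 : Prop) [Decidable c1] [Decidable c2] (s1 s2 s3 : ν) :
    (if c1 then lab.insert k s1 else if c2 then lab.insert k s2 else lab.insert k s3)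
      = lab.insert k (if c1 then s1 else if c2 then s2 else s3) := by
  split_ifs <;> rfl

theorem items_three (L0 L1 L2 : String) :
    (((PySem.Dict.empty.insert (0 : Int) L0).insert 1 L1).insert 2 L2).items
      = [(0, L0), (1, L1), (2, L2)] := by
  rw [PySem.Dict.items_insert_of_not_contains, PySem.Dict.items_insert_of_not_contains,
    PySem.Dict.items_insert_of_not_contains] <;>
    simp [PySem.Dict.contains_insert, PySem.Dict.empty]

-- ===== VERDICT (by name: the statement is the Claim_ definition above) =====
theorem build_tercile_labels_spec : Claim_equal_build_tercile_labels := by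
  intro mapping _
  show build_tercile_labels mapping = build_tercile_labels_alt mapping
  unfold build_tercile_labels build_tercile_labels_alt
  simp only [List.foldl_cons, List.foldl_nil, bounds_foldl, insert_ite, items_three,
    grouped_getD]
  have h0 : (PySem.Dict.ofList [((0 : Int), ([] : List Int)), (1, []), (2, [])]).getD 0 [] = [] := by decide
  have h1 : (PySem.Dict.ofList [((0 : Int), ([] : List Int)), (1, []), (2, [])]).getD 1 [] = [] := by decide
  have h2 : (PySem.Dict.ofList [((0 : Int), ([] : List Int)), (1, []), (2, [])]).getD 2 [] = [] := by decide
  rw [h0, h1, h2]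
  simp only [List.nil_append]
  rw [label_eq 0, label_eq 1, label_eq 2]
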